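-- pv_equiv track=rewrite | github.com/shitada/english-app | app/dal/sentence_echo.py | word_levenshtein
-- ===== SOURCE A (Python) =====
-- def word_levenshtein(a: list[str], b: list[str]) -> int:
--     """Token-level Levenshtein edit distance between two word lists."""
--     if not a:
--         return len(b)
--     if not b:
--         return len(a)
--     prev = list(range(len(b) + 1))
--     for i, ai in enumerate(a, start=1):
--         cur = [i] + [0] * len(b)
--         for j, bj in enumerate(b, start=1):
--             cost = 0 if ai == bj else 1
--             cur[j] = min(
--                 cur[j - 1] + 1,       # insertion
--                 prev[j] + 1,          # deletion
--                 prev[j - 1] + cost,   # substitution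
--             )
--         prev = cur
--     return prev[-1]
-- ===== SOURCE B (Python) =====
-- def word_levenshtein(a: list[str], b: list[str]) -> int:
--     """Token-level Levenshtein edit distance between two word lists.
--
--     Top-down memoized recursion: rec(i, j) is the distance between a[:i] and
--     b[:j]; base cases rec(0, j) = j and rec(i, 0) = i, the recursive case takes
--     the minimum of delete/insert/substitute. An explicit dict memoizes
--     subproblems, so no DP rows are ever materialised.
--     """
--     memo: dict[tuple[int, int], int] = {}
--
--     def rec(i: int, j: int) -> int:
--         if i == 0:
--             return j
--         if j == 0:
--             return i
--         if (i, j) in memo: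
--             return memo[(i, j)]
--         best = min(
--             rec(i - 1, j) + 1,
--             rec(i, j - 1) + 1,
--             rec(i - 1, j - 1) + (0 if a[i - 1] == b[j - 1] else 1),
--         )
--         memo[(i, j)] = best
--         return best
--
--     return rec(len(a), len(b))
-- ===== Notes on version B (the rewrite author's own statement) =====
-- stated objective: alternative
-- what changed: B replaces A's bottom-up iterative DP over explicit row arrays with a top-down memoized recursion rec(i, j) on prefix lengths, caching subproblems in a dict; A's empty-list early returns emerge from the base cases.
import Mathlib
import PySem

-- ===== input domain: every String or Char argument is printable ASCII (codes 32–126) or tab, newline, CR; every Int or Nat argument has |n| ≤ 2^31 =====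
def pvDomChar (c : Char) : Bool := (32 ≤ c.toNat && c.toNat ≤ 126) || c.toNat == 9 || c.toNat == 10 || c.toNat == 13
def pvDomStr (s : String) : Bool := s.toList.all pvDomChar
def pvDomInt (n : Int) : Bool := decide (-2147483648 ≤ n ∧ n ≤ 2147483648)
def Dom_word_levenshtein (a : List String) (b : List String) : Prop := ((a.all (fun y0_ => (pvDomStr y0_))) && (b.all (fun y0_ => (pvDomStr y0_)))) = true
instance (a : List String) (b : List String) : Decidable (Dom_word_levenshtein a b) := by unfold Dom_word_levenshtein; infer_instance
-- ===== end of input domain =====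

-- B replaces A's bottom-up row-array DP by a top-down memoized recursion on prefix
-- lengths (objective: alternative decomposition, same O(m·n) cost).

-- ===== PORT A =====
-- Literal port of A. Indices j, j-1 into `cur`/`prev` are always in range in the Python
-- (j ranges over 1..len(b), both lists have length len(b)+1), so the total forms
-- pySetD/pyGetD are exact here; prev[-1] is pyGetD prev (-1) 0 (prev is nonempty).
def word_levenshtein (a : List String) (b : List String) : Int :=
  if a = [] then (b.length : Int)
  else if b = [] then (a.length : Int)
  else
    let prev := (PySem.List.enumerate a 1).foldl (fun prev iai =>
        (PySem.List.enumerate b 1).foldl (fun cur jbj =>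
            let cost : Int := if iai.2 = jbj.2 then 0 else 1
            PySem.List.pySetD cur jbj.1
              (min (min (PySem.List.pyGetD cur (jbj.1 - 1) 0 + 1)
                        (PySem.List.pyGetD prev jbj.1 0 + 1))
                   (PySem.List.pyGetD prev (jbj.1 - 1) 0 + cost)))
          (iai.1 :: List.replicate b.length (0 : Int)))
      (PySem.List.pyRange 0 ((b.length : Int) + 1) 1)
    PySem.List.pyGetD prev (-1) 0

-- ===== PORT B =====
-- Literal port of B (Source B): rec(i, j) with an explicit memo dict threaded through the
-- recursion (Python's mutable `memo` becomes state passed in and out); the membership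
-- test + lookup pair `(i,j) in memo` / `memo[(i,j)]` is the match on Dict.get?;
-- a[i-1] / b[j-1] are in range since i ≥ 1, j ≥ 1 there. Recursive calls are evaluated
-- left to right exactly as Python evaluates min's arguments.
def recB (a b : List String) : Nat → Nat → PySem.Dict (Int × Int) Int → Int × PySem.Dict (Int × Int) Int
  | 0, j, memo => ((j : Int), memo)
  | i+1, 0, memo => ((i : Int) + 1, memo)
  | i+1, j+1, memo =>
      match memo.get? (((i+1 : Nat) : Int), ((j+1 : Nat) : Int)) with
      | some v => (v, memo)
      | none =>
          let r1 := recB a b i (j+1) memo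
          let r2 := recB a b (i+1) j r1.2
          let r3 := recB a b i j r2.2
          let best := min (min (r1.1 + 1) (r2.1 + 1))
                          (r3.1 + (if a[i]! = b[j]! then 0 else 1))
          (best, r3.2.insert (((i+1 : Nat) : Int), ((j+1 : Nat) : Int)) best)
  termination_by i j _ => (i, j)

def word_levenshtein_alt (a : List String) (b : List String) : Int :=
  (recB a b a.length b.length PySem.Dict.empty).1

-- ===== PRECONDITION & SPEC =====
def Spec_word_levenshtein (a : List String) (b : List String) (out : Int) : Prop := out = word_levenshtein_alt a b
instance (a : List String) (b : List String) (out : Int) : Decidable (Spec_word_levenshtein a b out) := by unfold Spec_word_levenshtein; infer_instance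

-- ===== CLAIM (what is proved, stated in full; the proofs are below) =====
def Claim_equal_word_levenshtein : Prop := ∀ (a : List String) (b : List String), Dom_word_levenshtein a b → Spec_word_levenshtein a b (word_levenshtein a b)

-- ===== LEMMAS AND PROOFS =====

-- the classical Levenshtein recurrence on prefix lengths; both ports are proved equal to it
def levL (a b : List String) : Nat → Nat → Int
  | 0, j => (j : Int)
  | i+1, 0 => ((i : Int) + 1)
  | i+1, j+1 =>
      min (min (levL a b (i+1) j + 1) (levL a b i (j+1) + 1))
          (levL a b i j + (if a[i]! = b[j]! then 0 else 1))
  termination_by i j => (i, j)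

theorem levL_zero_left (a b : List String) (j : Nat) : levL a b 0 j = (j : Int) := by
  simp [levL]

theorem levL_zero_right (a b : List String) (i : Nat) : levL a b i 0 = (i : Int) := by
  cases i <;> simp [levL]

theorem levL_succ (a b : List String) (i j : Nat) :
    levL a b (i+1) (j+1) =
      min (min (levL a b (i+1) j + 1) (levL a b i (j+1) + 1))
          (levL a b i j + (if a[i]! = b[j]! then 0 else 1)) := by
  simp [levL]

-- ---- A-side: the row DP computes levL ----

def inStepA (prev : List Int) (ai : String) : List Int → Int × String → List Int :=
  fun cur jbj =>
    let cost : Int := if ai = jbj.2 then 0 else 1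
    PySem.List.pySetD cur jbj.1
      (min (min (PySem.List.pyGetD cur (jbj.1 - 1) 0 + 1)
                (PySem.List.pyGetD prev jbj.1 0 + 1))
           (PySem.List.pyGetD prev (jbj.1 - 1) 0 + cost))

def eRange (xs : List String) (t : Nat) : List (Int × String) :=
  (List.range t).map (fun (k : Nat) => ((1 + (k : Int)), xs[k]!))

def rowA (b : List String) (prev : List Int) (iai : Int × String) : List Int :=
  (eRange b b.length).foldl (inStepA prev iai.2) (iai.1 :: List.replicate b.length (0 : Int))

def outA (a b : List String) (s : Nat) : List Int :=
  (eRange a s).foldl (rowA b) (PySem.List.pyRange 0 ((b.length : Int) + 1) 1)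

theorem eRange_succ (xs : List String) (t : Nat) :
    eRange xs (t+1) = eRange xs t ++ [((1 + (t : Int)), xs[t]!)] := by
  unfold eRange
  rw [List.range_succ, List.map_append]
  rfl

theorem pyRange_succ_map (n : Nat) :
    PySem.List.pyRange 0 ((n : Int) + 1) 1
      = (List.range (n+1)).map (fun (k : Nat) => ((k : Nat) : Int)) := by
  rw [PySem.List.pyRange_one]
  norm_num

theorem pyGetD_map_range (f : Nat → Int) (n k : Nat) (hk : k < n) :
    PySem.List.pyGetD ((List.range n).map f) ((k : Nat) : Int) 0 = f k := by
  rw [PySem.List.pyGetD_natCast, List.getD_eq_getElem?_getD, List.getElem?_map,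
    List.getElem?_range hk]
  rfl

theorem innerA (a b : List String) (i : Nat) (prev : List Int)
    (hp : ∀ k : Nat, k ≤ b.length → PySem.List.pyGetD prev (k : Int) 0 = levL a b i k) :
    ∀ t, t ≤ b.length →
      ((eRange b t).foldl (inStepA prev a[i]!)
        ((1 + (i : Int)) :: List.replicate b.length (0 : Int))).length = b.length + 1
      ∧ ∀ k : Nat, k ≤ t →
        PySem.List.pyGetD
          ((eRange b t).foldl (inStepA prev a[i]!)
            ((1 + (i : Int)) :: List.replicate b.length (0 : Int))) (k : Int) 0
          = levL a b (i+1) k := by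
  intro t
  induction t with
  | zero =>
      intro _
      constructor
      · simp [eRange]
      · intro k hk
        interval_cases k
        simp [eRange, PySem.List.pyGetD_zero_cons, levL_zero_right]
        ring
  | succ t ih =>
      intro ht
      obtain ⟨ihlen, ihget⟩ := ih (by omega)
      rw [eRange_succ, List.foldl_append]
      simp only [List.foldl_cons, List.foldl_nil]
      set cur := (eRange b t).foldl (inStepA prev a[i]!)
        ((1 + (i : Int)) :: List.replicate b.length (0 : Int)) with hcur
      simp only [inStepA]
      have h0 : (1 + (t : Int)) - 1 = ((t : Nat) : Int) := by ring
      have h1 : (1 + (t : Int)) = ((t+1 : Nat) : Int) := by push_cast; ring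
      simp only [h0]
      simp only [h1, PySem.List.pySetD_natCast]
      have hv : min (min (PySem.List.pyGetD cur ((t : Nat) : Int) 0 + 1)
                        (PySem.List.pyGetD prev ((t+1 : Nat) : Int) 0 + 1))
                   (PySem.List.pyGetD prev ((t : Nat) : Int) 0 + (if a[i]! = b[t]! then 0 else 1))
          = levL a b (i+1) (t+1) := by
        rw [ihget t (by omega), hp (t+1) (by omega), hp t (by omega), levL_succ]
      rw [hv]
      constructor
      · simp [ihlen]
      · intro k hk
        rw [PySem.List.pyGetD_natCast, List.getD_eq_getElem?_getD, List.getElem?_set]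
        by_cases hkt : k = t + 1
        · subst hkt
          simp [ihlen, Nat.lt_succ_of_le ht]
        · rw [if_neg (by omega), ← List.getD_eq_getElem?_getD, ← PySem.List.pyGetD_natCast]
          exact ihget k (by omega)

theorem outerA (a b : List String) :
    ∀ s, s ≤ a.length →
      (outA a b s).length = b.length + 1
      ∧ ∀ k : Nat, k ≤ b.length →
        PySem.List.pyGetD (outA a b s) (k : Int) 0 = levL a b s k := by
  intro s
  induction s with
  | zero =>
      intro _
      constructor
      · unfold outA eRange
        rw [pyRange_succ_map]
        simp
      · intro k hk
        unfold outA eRange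
        rw [pyRange_succ_map]
        simp only [List.map_nil, List.range_zero, List.foldl_nil]
        rw [pyGetD_map_range _ _ _ (by omega), levL_zero_left]
  | succ s ih =>
      intro hs
      obtain ⟨ihlen, ihget⟩ := ih (by omega)
      unfold outA
      rw [eRange_succ, List.foldl_append]
      simp only [List.foldl_cons, List.foldl_nil]
      have h := innerA a b s (outA a b s) ihget b.length (le_refl _)
      unfold rowA
      exact h

theorem enumerate_eq_map_range {α : Type} [Inhabited α] (xs : List α) (s : Int) :
    PySem.List.enumerate xs s
      = (List.range xs.length).map (fun (k : Nat) => (s + (k : Int), xs[k]!)) := by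
  induction xs generalizing s with
  | nil => simp [PySem.List.enumerate_nil]
  | cons x t ih =>
      rw [PySem.List.enumerate_cons, ih]
      simp only [List.length_cons, List.range_succ_eq_map, List.map_cons, List.map_map]
      refine List.cons_eq_cons.mpr ⟨by simp, ?_⟩
      apply List.map_congr_left
      intro k _
      simp only [Function.comp_apply, List.getElem!_cons_succ]
      refine Prod.ext ?_ rfl
      push_cast; ring

theorem enumerate_eq_eRange (xs : List String) :
    PySem.List.enumerate xs 1 = eRange xs xs.length := by
  rw [enumerate_eq_map_range]
  rfl

theorem A_eq_levL (a b : List String) :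
    word_levenshtein a b = levL a b a.length b.length := by
  unfold word_levenshtein
  split_ifs with h1 h2
  · subst h1; simp [levL_zero_left]
  · subst h2; simp [levL_zero_right]
  · rw [enumerate_eq_eRange a, enumerate_eq_eRange b]
    show PySem.List.pyGetD (outA a b a.length) (-1) 0 = levL a b a.length b.length
    obtain ⟨hlen, hget⟩ := outerA a b a.length (le_refl _)
    have hne : outA a b a.length ≠ [] := by
      intro h; rw [h] at hlen; simp at hlen
    rw [PySem.List.pyGetD_neg_one _ _ hne]
    have := hget b.length (le_refl _)
    rw [PySem.List.pyGetD_natCast, List.getD_eq_getElem?_getD,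
      List.getElem?_eq_getElem (by omega)] at this
    rw [List.getLast_eq_getElem]
    rw [← this]
    congr 1
    omega

-- ---- B-side: the memoized recursion computes levL ----

-- the memo invariant: every stored entry is the correct subproblem value
def GoodMemo (a b : List String) (memo : PySem.Dict (Int × Int) Int) : Prop :=
  ∀ (i j : Nat) (v : Int), memo.get? ((i : Int), (j : Int)) = some v → v = levL a b i j

theorem recB_spec (a b : List String) :
    ∀ i j memo, GoodMemo a b memo →
      (recB a b i j memo).1 = levL a b i j ∧ GoodMemo a b (recB a b i j memo).2 := by
  intro i
  induction i with
  | zero =>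
      intro j memo h
      simp only [recB]
      exact ⟨(levL_zero_left a b j).symm, h⟩
  | succ i ihi =>
      intro j
      induction j with
      | zero =>
          intro memo h
          simp only [recB]
          refine ⟨?_, h⟩
          rw [levL_zero_right]
          push_cast; ring
      | succ j ihj =>
          intro memo h
          rw [recB]
          cases hm : memo.get? (((i+1 : Nat) : Int), ((j+1 : Nat) : Int)) with
          | some v =>
              exact ⟨h (i+1) (j+1) v hm, h⟩
          | none =>
              obtain ⟨e1, g1⟩ := ihi (j+1) memo h
              obtain ⟨e2, g2⟩ := ihj (recB a b i (j+1) memo).2 g1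
              obtain ⟨e3, g3⟩ := ihi j (recB a b (i+1) j (recB a b i (j+1) memo).2).2 g2
              simp only [e1, e2, e3]
              have hbest : min (min (levL a b i (j+1) + 1) (levL a b (i+1) j + 1))
                  (levL a b i j + (if a[i]! = b[j]! then 0 else 1)) = levL a b (i+1) (j+1) := by
                rw [levL_succ, min_comm (levL a b (i+1) j + 1) (levL a b i (j+1) + 1)]
              refine ⟨hbest, ?_⟩
              intro i' j' v hv
              rw [PySem.Dict.get?_insert] at hv
              by_cases heq : (((i' : Nat) : Int), ((j' : Nat) : Int))
                  = (((i+1 : Nat) : Int), ((j+1 : Nat) : Int))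
              · rw [if_pos heq] at hv
                have hi1 : i' = i + 1 := by
                  have h5 : ((i' : Nat) : Int) = ((i+1 : Nat) : Int) := congrArg Prod.fst heq
                  exact_mod_cast h5
                have hj1 : j' = j + 1 := by
                  have h5 : ((j' : Nat) : Int) = ((j+1 : Nat) : Int) := congrArg Prod.snd heq
                  exact_mod_cast h5
                subst hi1; subst hj1
                rw [← Option.some.inj hv, hbest]
              · rw [if_neg heq] at hv
                exact g3 i' j' v hv

theorem B_eq_levL (a b : List String) :
    word_levenshtein_alt a b = levL a b a.length b.length := by
  unfold word_levenshtein_alt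
  exact (recB_spec a b a.length b.length PySem.Dict.empty
    (by intro i j v hv; simp [PySem.Dict.get?_empty] at hv)).1

-- ===== VERDICT (by name: the statement is the Claim_ definition above) =====
theorem word_levenshtein_spec : Claim_equal_word_levenshtein := by
  intro a b _
  unfold Spec_word_levenshtein
  rw [A_eq_levL, B_eq_levL]
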